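-- pv_equiv track=rewrite | github.com/imn00133/algorithm | BaekJoonOnlineJudge/500BruteForce/Main/baekjoon_3085.py | line_count_candy
-- ===== SOURCE A (Python) =====
-- def line_count_candy(line):
--     count_list = []
--     count = 1
--     for index in range(1, len(line)):
--         if line[index] == line[index - 1]:
--             count += 1
--         else:
--             count_list.append(count)
--             count = 1
--     count_list.append(count)
--     return max(count_list)
-- ===== SOURCE B (Python) =====
-- def line_count_candy(line):
--     n = len(line)
--     cuts = [i for i in range(1, n) if line[i] != line[i - 1]]
--     cuts = [0] + cuts + [n]
--     return max(b - a for a, b in zip(cuts, cuts[1:]))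
-- ===== Notes on version B (the rewrite author's own statement) =====
-- stated objective: alternative
-- what changed: B works in two staged passes over positions instead of accumulating run lengths: it first collects the break indices where the character changes, frames them with 0 and len(line), and then returns the maximum difference between consecutive cut positions.
-- outside the precondition, e.g. on line_count_candy(''): A returns 1, B returns 0
import Mathlib
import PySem

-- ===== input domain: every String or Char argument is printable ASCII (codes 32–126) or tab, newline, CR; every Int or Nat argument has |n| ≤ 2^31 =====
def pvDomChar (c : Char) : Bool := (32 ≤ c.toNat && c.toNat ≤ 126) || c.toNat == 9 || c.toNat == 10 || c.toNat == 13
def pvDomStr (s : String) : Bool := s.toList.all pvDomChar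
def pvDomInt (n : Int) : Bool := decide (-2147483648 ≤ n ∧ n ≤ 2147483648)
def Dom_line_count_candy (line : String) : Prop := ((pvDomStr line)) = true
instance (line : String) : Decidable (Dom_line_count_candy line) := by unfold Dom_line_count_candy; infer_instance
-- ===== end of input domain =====

-- B replaces A's run-length-accumulating loop by two staged passes: first collect the break
-- positions (indices where the character changes), then take the maximum gap between
-- consecutive cut positions; objective: alternative algorithm, same O(n) cost.

-- ===== PORT A =====
-- A: for index in range(1, len(line)): compare line[index] with line[index-1], collecting
-- finished run lengths; append the last run; return max(count_list).
def line_count_candy (line : String) : Int :=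
  let cs := line.toList
  let st := (PySem.List.pyRange 1 (cs.length : Int) 1).foldl
    (fun (s : List Int × Int) index =>
      if PySem.List.pyGetD cs index ' ' == PySem.List.pyGetD cs (index - 1) ' '
      then (s.1, s.2 + 1)
      else (s.1 ++ [s.2], 1))
    ([], 1)
  let count_list := st.1 ++ [st.2]
  -- max(count_list): count_list is never empty (the final append), so the default is unreachable
  (PySem.List.max? count_list (fun x => x)).getD 0

-- ===== PORT B =====
-- B: cuts = [i for i in range(1,n) if line[i] != line[i-1]]; cuts = [0] + cuts + [n];
-- max(b - a for a, b in zip(cuts, cuts[1:])).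
-- cuts[1:] on a plain list with nonnegative index is exactly List.drop 1;
-- the generator max is map then max? (the pair list is nonempty: cuts has ≥ 2 elements).
def line_count_candy_alt (line : String) : Int :=
  let cs := line.toList
  let n : Int := cs.length
  let cuts := (PySem.List.pyRange 1 n 1).filter
    (fun i => !(PySem.List.pyGetD cs i ' ' == PySem.List.pyGetD cs (i - 1) ' '))
  let cuts2 := 0 :: cuts ++ [n]
  (PySem.List.max? ((cuts2.zip (cuts2.drop 1)).map (fun p => p.2 - p.1)) (fun x => x)).getD 0

-- ===== PRECONDITION & SPEC =====
-- Pre_ excludes only the empty string, a degenerate corner with no runs at all on which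
-- no behaviour is specified: A returns 1 and B returns 0, both defensible readings.
def Pre_line_count_candy (line : String) : Prop := line ≠ ""
instance (line : String) : Decidable (Pre_line_count_candy line) := by unfold Pre_line_count_candy; infer_instance
def pvWitness_line_count_candy : String := "aab"

def Spec_line_count_candy (line : String) (out : Int) : Prop := out = line_count_candy_alt line
instance (line : String) (out : Int) : Decidable (Spec_line_count_candy line out) := by unfold Spec_line_count_candy; infer_instance

-- ===== CLAIM (what is proved, stated in full; the proofs are below) =====
def Claim_equal_line_count_candy : Prop := ∀ (line : String), Dom_line_count_candy line → Pre_line_count_candy line → Spec_line_count_candy line (line_count_candy line)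

-- ===== LEMMAS AND PROOFS =====

-- A's loop body, abstracted over the character pair it compares (prev = line[index-1]).
def aloop : Char → List Char → (List Int × Int) → (List Int × Int)
  | _, [], s => s
  | prev, r :: t, s =>
      aloop r t (if r == prev then (s.1, s.2 + 1) else (s.1 ++ [s.2], 1))

-- B's break positions, abstracted the same way: pos = index of the head of the remaining list.
def brk : Char → List Char → Int → List Int
  | _, [], _ => []
  | prev, r :: t, pos =>
      if r == prev then brk r t (pos + 1) else pos :: brk r t (pos + 1)

-- consecutive differences, as a plain recursion
def diffs : List Int → List Int
  | a :: b :: t => (b - a) :: diffs (b :: t)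
  | _ => []

lemma diffs_zip (l : List Int) :
    (l.zip (l.drop 1)).map (fun p => p.2 - p.1) = diffs l := by
  match l with
  | [] => rfl
  | [a] => rfl
  | a :: b :: t =>
      simp only [List.drop_succ_cons, List.drop_zero, List.zip_cons_cons, List.map_cons, diffs]
      exact congrArg _ (diffs_zip (b :: t))

lemma aloop_acc (rest : List Char) : ∀ (prev : Char) (acc : List Int) (k : Int),
    aloop prev rest (acc, k)
      = (acc ++ (aloop prev rest ([], k)).1, (aloop prev rest ([], k)).2) := by
  induction rest with
  | nil => intro prev acc k; simp [aloop]
  | cons r t ih =>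
      intro prev acc k
      by_cases h : r == prev
      · simp only [aloop, h, if_true]
        exact ih r acc (k + 1)
      · simp only [aloop, h, Bool.false_eq_true, if_false, List.nil_append]
        rw [ih r (acc ++ [k]) 1, ih r [k] 1]
        simp

-- A's index-based fold is the pair loop `aloop`, for any suffix position.
lemma idxfold (rest : List Char) : ∀ (front : List Char) (c : Char) (init : List Int × Int),
    (PySem.List.pyRange ((front.length : Int) + 1) ((front.length : Int) + 1 + rest.length) 1).foldl
      (fun (s : List Int × Int) index =>
        if PySem.List.pyGetD (front ++ c :: rest) index ' '
            == PySem.List.pyGetD (front ++ c :: rest) (index - 1) ' '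
        then (s.1, s.2 + 1)
        else (s.1 ++ [s.2], 1)) init
    = aloop c rest init := by
  induction rest with
  | nil =>
      intro front c init
      rw [PySem.List.pyRange_one_eq_nil (by simp)]
      rfl
  | cons r t ih =>
      intro front c init
      have hm : ((front.length : Int) + 1) < ((front.length : Int) + 1 + ((r :: t).length : Int)) := by
        simp only [List.length_cons]
        omega
      rw [PySem.List.pyRange_one_cons hm]
      simp only [List.foldl_cons]
      have hget1 : PySem.List.pyGetD (front ++ c :: r :: t) ((front.length : Int) + 1) ' ' = r := by
        have e1 : ((front.length : Int) + 1) = ((front.length + 1 : Nat) : Int) := by push_cast; ring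
        rw [e1, PySem.List.pyGetD_natCast, List.getD_append_right _ _ _ _ (by omega)]
        have e2 : front.length + 1 - front.length = 1 := by omega
        rw [e2]
        rfl
      have hget0 : PySem.List.pyGetD (front ++ c :: r :: t) ((front.length : Int) + 1 - 1) ' ' = c := by
        have e1 : ((front.length : Int) + 1 - 1) = ((front.length : Nat) : Int) := by omega
        rw [e1, PySem.List.pyGetD_natCast, List.getD_append_right _ _ _ _ (by omega)]
        have e2 : front.length - front.length = 0 := by omega
        rw [e2]
        rfl
      rw [hget1, hget0]
      have ihspec := ih (front ++ [c]) r
        (if r == c then (init.1, init.2 + 1) else (init.1 ++ [init.2], 1))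
      have hre : front ++ c :: r :: t = (front ++ [c]) ++ r :: t := by simp
      have hlen : (((front ++ [c]).length : Int)) = (front.length : Int) + 1 := by simp
      rw [hlen] at ihspec
      have hbound : (front.length : Int) + 1 + ((r :: t).length : Int)
          = (front.length : Int) + 1 + 1 + (t.length : Int) := by
        simp only [List.length_cons]
        omega
      rw [hre, hbound, ihspec]
      simp only [aloop]

-- B's index-based filter is the break-position loop `brk`, for any suffix position.
lemma brkfold (rest : List Char) : ∀ (front : List Char) (c : Char),
    (PySem.List.pyRange ((front.length : Int) + 1) ((front.length : Int) + 1 + rest.length) 1).filter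
      (fun i => !(PySem.List.pyGetD (front ++ c :: rest) i ' '
            == PySem.List.pyGetD (front ++ c :: rest) (i - 1) ' '))
    = brk c rest ((front.length : Int) + 1) := by
  induction rest with
  | nil =>
      intro front c
      rw [PySem.List.pyRange_one_eq_nil (by simp)]
      rfl
  | cons r t ih =>
      intro front c
      have hm : ((front.length : Int) + 1) < ((front.length : Int) + 1 + ((r :: t).length : Int)) := by
        simp only [List.length_cons]
        omega
      rw [PySem.List.pyRange_one_cons hm]
      rw [List.filter_cons]
      have hget1 : PySem.List.pyGetD (front ++ c :: r :: t) ((front.length : Int) + 1) ' ' = r := by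
        have e1 : ((front.length : Int) + 1) = ((front.length + 1 : Nat) : Int) := by push_cast; ring
        rw [e1, PySem.List.pyGetD_natCast, List.getD_append_right _ _ _ _ (by omega)]
        have e2 : front.length + 1 - front.length = 1 := by omega
        rw [e2]
        rfl
      have hget0 : PySem.List.pyGetD (front ++ c :: r :: t) ((front.length : Int) + 1 - 1) ' ' = c := by
        have e1 : ((front.length : Int) + 1 - 1) = ((front.length : Nat) : Int) := by omega
        rw [e1, PySem.List.pyGetD_natCast, List.getD_append_right _ _ _ _ (by omega)]
        have e2 : front.length - front.length = 0 := by omega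
        rw [e2]
        rfl
      simp only [hget1, hget0]
      have ihspec := ih (front ++ [c]) r
      have hre : front ++ c :: r :: t = (front ++ [c]) ++ r :: t := by simp
      have hlen : (((front ++ [c]).length : Int)) = (front.length : Int) + 1 := by simp
      rw [hlen] at ihspec
      have hbound : (front.length : Int) + 1 + ((r :: t).length : Int)
          = (front.length : Int) + 1 + 1 + (t.length : Int) := by
        simp only [List.length_cons]
        omega
      rw [hre, hbound, ihspec]
      by_cases h : r == c
      · simp [brk, h]
      · simp [brk, h]

-- The gaps between consecutive cut positions are exactly A's run lengths.
lemma gaps (rest : List Char) : ∀ (prev : Char) (q p : Int),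
    diffs (q :: (brk prev rest p ++ [p + (rest.length : Int)]))
      = (aloop prev rest ([], p - q)).1 ++ [(aloop prev rest ([], p - q)).2] := by
  induction rest with
  | nil =>
      intro prev q p
      simp [brk, aloop, diffs]
  | cons r t ih =>
      intro prev q p
      by_cases h : r == prev
      · simp only [brk, aloop, h, if_true, List.nil_append]
        have e1 : p + ((r :: t).length : Int) = (p + 1) + (t.length : Int) := by
          simp only [List.length_cons]; omega
        have e2 : (p + 1) - q = (p - q) + 1 := by omega
        rw [e1, ih r q (p + 1), e2]
      · simp only [brk, aloop, h, Bool.false_eq_true, if_false, List.nil_append, List.cons_append]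
        have e1 : p + ((r :: t).length : Int) = (p + 1) + (t.length : Int) := by
          simp only [List.length_cons]; omega
        have e2 : (p + 1) - p = (1 : Int) := by omega
        rw [e1, show (diffs (q :: p :: (brk r t (p + 1) ++ [(p + 1) + (t.length : Int)])))
              = (p - q) :: diffs (p :: (brk r t (p + 1) ++ [(p + 1) + (t.length : Int)])) from rfl,
          ih r p (p + 1), e2, aloop_acc t r [p - q] 1]
        simp

-- ===== VERDICT (by name: the statement is the Claim_ definition above) =====
theorem line_count_candy_spec : Claim_equal_line_count_candy := by
  intro line _ hpre
  unfold Spec_line_count_candy line_count_candy line_count_candy_alt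
  cases hcs : line.toList with
  | nil =>
      exact absurd (String.toList_inj.mp (by simpa using hcs)) hpre
  | cons c rest =>
      simp only []
      have hlen' : (1 : Int) + (rest.length : Int) = ((c :: rest).length : Int) := by
        simp only [List.length_cons]
        omega
      have hfoldA := idxfold rest [] c ([], 1)
      simp only [List.nil_append, List.length_nil, Nat.cast_zero, zero_add] at hfoldA
      rw [hlen'] at hfoldA
      have hfoldB := brkfold rest [] c
      simp only [List.nil_append, List.length_nil, Nat.cast_zero, zero_add] at hfoldB
      rw [hlen'] at hfoldB
      have hg := gaps rest c 0 1
      rw [hlen'] at hg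
      have e2 : (1 : Int) - 0 = 1 := by omega
      rw [e2] at hg
      refine (congrArg (fun st : List Int × Int =>
        (PySem.List.max? (st.1 ++ [st.2]) (fun x : Int => x)).getD 0) hfoldA).trans ?_
      refine Eq.trans ?_ (congrArg (fun cuts : List Int =>
        (PySem.List.max? (((0 :: cuts ++ [((c :: rest).length : Int)]).zip
            ((0 :: cuts ++ [((c :: rest).length : Int)]).drop 1)).map (fun p => p.2 - p.1))
          (fun x : Int => x)).getD 0) hfoldB.symm)
      rw [diffs_zip]
      exact congrArg (fun l => (PySem.List.max? l (fun x : Int => x)).getD 0) hg.symm
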